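-- pv_equiv track=rewrite | github.com/miliar/Code_Jam_Webscraper | solutions_python/solutions_year13_round0_nr1/2094.py | solve
-- ===== SOURCE A (Python) =====
-- def checkrow(string):
--     x=string.count("X")
--     y=string.count("O")
--     t=string.count("T")
--     if x+t==4:
--         return ("X")
--     elif y+t==4:
--         return ("O")
--     else:
--         return ("F")
--
-- def solve(l):
--     pcount=0
--     for row in l:
--         pcount=pcount+row.count(".")
--         re=checkrow(row)
--         if re!="F":
--             return re+" won"
--     strin=""
--     for i in range(4):
--         strin=l[0][i]+l[1][i]+l[2][i]+l[3][i]
--         re=checkrow(strin)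
--         if re!="F":
--             return re+" won"
--     dia=l[0][0]+l[1][1]+l[2][2]+l[3][3]
--     re=checkrow(dia)
--     if re!="F":
--         return re+" won"
--     dia2=l[0][3]+l[1][2]+l[2][1]+l[3][0]
--     re=checkrow(dia2)
--     if re!="F":
--         return re+" won"
--     if pcount==0:
--         return "Draw"
--     else:
--         return "Game has not completed"
-- ===== SOURCE B (Python) =====
-- def solve(l):
--     # Pass 1 over the rows: '.'-count and the first winning row, no line strings.
--     dots = 0
--     rowwin = None
--     for row in l:
--         fx = sum(ch == 'X' or ch == 'T' for ch in row)
--         fo = sum(ch == 'O' or ch == 'T' for ch in row)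
--         dots += sum(ch == '.' for ch in row)
--         if rowwin is None and fx == 4:
--             rowwin = 'X'
--         elif rowwin is None and fo == 4:
--             rowwin = 'O'
--     if rowwin is not None:
--         return rowwin + " won"
--     # Pass 2 over the 16 cells: per-line tallies of X-friendly / O-friendly cells
--     # for the six remaining lines (columns 0-3, diagonal 4, anti-diagonal 5).
--     okx = [0] * 6
--     oko = [0] * 6
--     for r in range(4):
--         for c in range(4):
--             ch = l[r][c]
--             lines = [c]
--             if r == c:
--                 lines.append(4)
--             if r + c == 3:
--                 lines.append(5)
--             for j in lines:
--                 if ch == 'X' or ch == 'T':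
--                     okx[j] += 1
--                 if ch == 'O' or ch == 'T':
--                     oko[j] += 1
--     # One scan of the tallies decides the result.
--     for j in range(6):
--         if okx[j] == 4:
--             return "X won"
--         if oko[j] == 4:
--             return "O won"
--     return "Draw" if dots == 0 else "Game has not completed"
-- ===== Notes on version B (the rewrite author's own statement) =====
-- stated objective: alternative
-- what changed: A extracts each of the 10 winning lines as a 4-character string and tests it with three substring counts, returning mid-loop; B never builds line strings: a row pass accumulates the '.'-count and the first winning row, a pass over the 16 cells accumulates per-line tallies of X-friendly and O-friendly cells for the six column/diagonal lines, and one scan of the tally arrays decides the result.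
-- outside the precondition, e.g. on solve(['X', 'X', 'X', 'X']): A returns 'X won', B raises IndexError; on solve(['TTT.', 'OOO', 'OOO', 'OOO']): A returns 'O won', B raises IndexError
import Mathlib
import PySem

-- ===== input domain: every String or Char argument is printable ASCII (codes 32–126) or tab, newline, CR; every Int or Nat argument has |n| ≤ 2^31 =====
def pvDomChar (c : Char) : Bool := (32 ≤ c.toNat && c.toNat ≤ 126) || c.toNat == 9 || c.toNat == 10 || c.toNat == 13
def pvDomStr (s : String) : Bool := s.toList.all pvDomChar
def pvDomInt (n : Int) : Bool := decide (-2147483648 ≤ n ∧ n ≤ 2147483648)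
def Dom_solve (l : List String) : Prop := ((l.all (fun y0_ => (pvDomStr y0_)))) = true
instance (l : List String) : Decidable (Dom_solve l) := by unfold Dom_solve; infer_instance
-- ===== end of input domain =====

-- B never builds A's per-line strings: a row pass accumulates the '.'-count and the
-- first winning row, then a pass over the 16 cells accumulates per-line tallies of
-- X-friendly / O-friendly cells for the six column/diagonal lines, and one scan of
-- the tallies decides; same cost, different data organisation.


-- ===== PORT A =====
def checkrow (s : String) : String :=
  let x := PySem.Str.count s "X"
  let y := PySem.Str.count s "O"
  let t := PySem.Str.count s "T"
  if x + t = 4 then "X"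
  else if y + t = 4 then "O"
  else "F"

-- l[r][c]; the '?' default is the IndexError path, excluded by Pre_solve
def cellA (l : List String) (r c : Int) : Char :=
  ((PySem.List.pyGet? l r).bind (fun s => PySem.Str.pyGet? s c)).getD '?'

-- the first for-loop: accumulates pcount, early-returns a winner
def rowLoopA : List String → Int → Sum String Int
  | [], p => .inr p
  | r :: rs, p =>
    let p' := p + (PySem.Str.count r "." : Int)
    let re := checkrow r
    if re ≠ "F" then .inl (re ++ " won") else rowLoopA rs p'

-- the second for-loop over range(4): builds each column string, early-returns a winner
def colLoopA (l : List String) : List Int → Option String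
  | [] => none
  | i :: is =>
    let strin := String.ofList [cellA l 0 i, cellA l 1 i, cellA l 2 i, cellA l 3 i]
    let re := checkrow strin
    if re ≠ "F" then some (re ++ " won") else colLoopA l is

def solve (l : List String) : String :=
  match rowLoopA l 0 with
  | .inl res => res
  | .inr pcount =>
    match colLoopA l (PySem.List.pyRange 0 4 1) with
    | some res => res
    | none =>
      let dia := String.ofList [cellA l 0 0, cellA l 1 1, cellA l 2 2, cellA l 3 3]
      let re := checkrow dia
      if re ≠ "F" then re ++ " won"
      else
        let dia2 := String.ofList [cellA l 0 3, cellA l 1 2, cellA l 2 1, cellA l 3 0]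
        let re2 := checkrow dia2
        if re2 ≠ "F" then re2 ++ " won"
        else if pcount = 0 then "Draw" else "Game has not completed"

-- ===== PORT B =====
-- ch == 'X' or ch == 'T'  /  ch == 'O' or ch == 'T'
def friendX (c : Char) : Bool := c == 'X' || c == 'T'
def friendO (c : Char) : Bool := c == 'O' || c == 'T'

-- okx[j] += 1  (j is always < 6 in B)
def bump (v : List Int) (j : Nat) : List Int := v.set j (v.getD j 0 + 1)

-- pass 1: one row of "for row in l" — state (dots, rowwin);
-- sum(bool for …) is ported as countP
def rowAcc (st : Int × Option String) (row : String) : Int × Option String :=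
  let fx : Nat := row.toList.countP friendX
  let fo : Nat := row.toList.countP friendO
  let dots' := st.1 + (row.toList.countP (· == '.') : Int)
  let rw' := if st.2 = none ∧ fx = 4 then some "X"
             else if st.2 = none ∧ fo = 4 then some "O" else st.2
  (dots', rw')

-- l[r][c]; the '?' default is the IndexError path, excluded by Pre_solve
-- (r, c come from range(4), so the Nat → Int casts are exact)
def cellB (l : List String) (r c : Nat) : Char :=
  ((PySem.List.pyGet? l (r : Int)).bind (fun s => PySem.Str.pyGet? s (c : Int))).getD '?'

-- the body of "for j in lines: if …: okx[j] += 1; if …: oko[j] += 1" for one cell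
def cellOp (r c : Nat) (ch : Char) (st : List Int × List Int) : List Int × List Int :=
  let lines := [c] ++ (if r = c then [4] else []) ++ (if r + c = 3 then [5] else [])
  lines.foldl (fun t j =>
    (if friendX ch then bump t.1 j else t.1,
     if friendO ch then bump t.2 j else t.2)) st

-- "for j in range(6): …" then the draw/ongoing decision
def finalScan (okx oko : List Int) (dots : Int) : List Nat → String
  | [] => if dots = 0 then "Draw" else "Game has not completed"
  | j :: js =>
    if okx.getD j 0 = 4 then "X won"
    else if oko.getD j 0 = 4 then "O won"
    else finalScan okx oko dots js

-- range(4) / range(6) over Nat counters are List.range (exact)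
def solve_alt (l : List String) : String :=
  let rd := l.foldl rowAcc (0, none)
  match rd.2 with
  | some w => w ++ " won"
  | none =>
    let t := (List.range 4).foldl
      (fun st r => (List.range 4).foldl (fun st c => cellOp r c (cellB l r c) st) st)
      ([0, 0, 0, 0, 0, 0], [0, 0, 0, 0, 0, 0])
    finalScan t.1 t.2 rd.1 (List.range 6)

-- ===== PRECONDITION & SPEC =====
-- Pre_ excludes the malformed boards (fewer than 4 rows, or a short row among the
-- first four, and no winning row) on which A raises IndexError while building a
-- column string; on a few such boards an early winning column lets A return "… won"
-- before it reaches the missing cell — B's fixed 4x4 cell pass raises IndexError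
-- there, so those boards stay outside Pre_.
def Pre_solve (l : List String) : Prop :=
  (∃ s ∈ l, PySem.Str.count s "X" + PySem.Str.count s "T" = 4
          ∨ PySem.Str.count s "O" + PySem.Str.count s "T" = 4)
  ∨ (4 ≤ l.length ∧ ∀ s ∈ l.take 4, 4 ≤ s.toList.length)
instance (l : List String) : Decidable (Pre_solve l) := by unfold Pre_solve; infer_instance

def pvWitness_solve : List String := ["X.O.", "OT..", "..X.", "O..X"]

def Spec_solve (l : List String) (out : String) : Prop := out = solve_alt l
instance (l : List String) (out : String) : Decidable (Spec_solve l out) := by unfold Spec_solve; infer_instance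

-- ===== CLAIM (what is proved, stated in full; the proofs are below) =====
def Claim_equal_solve : Prop := ∀ (l : List String), Dom_solve l → Pre_solve l → Spec_solve l (solve l)

-- ===== LEMMAS AND PROOFS =====

-- A helper constant used only by the proofs
def gX (c : Char) : Int := if friendX c then 1 else 0
def gO (c : Char) : Int := if friendO c then 1 else 0

-- single-character needle: PySem's substring count is List.count
theorem go_single (v : Char) (s : List Char) : ∀ (fuel acc : Nat), s.length ≤ fuel →
    PySem.Chars.count.go [v] fuel s acc = acc + s.count v := by
  induction s with
  | nil => intro fuel acc _; cases fuel <;> simp [PySem.Chars.count.go]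
  | cons h t ih =>
    intro fuel acc hf
    cases fuel with
    | zero => simp at hf
    | succ f =>
      rw [PySem.Chars.count.go]
      simp only [List.length_cons] at hf
      by_cases hv : v = h
      · have hp : ([v].isPrefixOf (h :: t)) = true := by simp [List.isPrefixOf, hv]
        simp only [hp, if_true, List.length_singleton, List.drop_one, List.tail_cons]
        rw [ih f (acc+1) (by omega), List.count_cons]
        simp [hv]
        omega
      · have hp : ([v].isPrefixOf (h :: t)) = false := by
          simp [List.isPrefixOf]; exact fun e => hv e
        simp only [hp]
        rw [ih f acc (by omega), List.count_cons]
        have : ¬ h = v := fun e => hv e.symm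
        simp [this]

theorem count_single (v : Char) (s : String) : PySem.Str.count s (String.ofList [v]) = s.toList.count v := by
  simp only [PySem.Str.count_eq]
  have h : (String.ofList [v]).toList = [v] := by simp
  rw [PySem.Chars.count, h]
  simpa using go_single v s.toList s.toList.length 0 le_rfl

theorem countXT (cs : List Char) : cs.count 'X' + cs.count 'T' = cs.countP friendX := by
  induction cs with
  | nil => rfl
  | cons c cs ih =>
    rw [List.count_cons, List.count_cons, List.countP_cons]
    by_cases h1 : c = 'X' <;> by_cases h2 : c = 'T' <;> simp_all [friendX] <;> omega

theorem countOT (cs : List Char) : cs.count 'O' + cs.count 'T' = cs.countP friendO := by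
  induction cs with
  | nil => rfl
  | cons c cs ih =>
    rw [List.count_cons, List.count_cons, List.countP_cons]
    by_cases h1 : c = 'O' <;> by_cases h2 : c = 'T' <;> simp_all [friendO] <;> omega

-- checkrow classified by the two countP conditions
theorem checkrow_cases (s : String) :
    (checkrow s = "X" ∧ s.toList.countP friendX = 4)
    ∨ (checkrow s = "O" ∧ s.toList.countP friendX ≠ 4 ∧ s.toList.countP friendO = 4)
    ∨ (checkrow s = "F" ∧ s.toList.countP friendX ≠ 4 ∧ s.toList.countP friendO ≠ 4) := by
  unfold checkrow
  have hX : PySem.Str.count s "X" = s.toList.count 'X' := count_single 'X' s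
  have hO : PySem.Str.count s "O" = s.toList.count 'O' := count_single 'O' s
  have hT : PySem.Str.count s "T" = s.toList.count 'T' := count_single 'T' s
  simp only [hX, hO, hT, countXT, countOT]
  split_ifs with h1 h2 <;> simp_all

-- the first winning row's letter, and the total '.'-count (shared spec shapes)
def rwSpec : List String → Option String
  | [] => none
  | s :: ss =>
    if s.toList.countP friendX = 4 then some "X"
    else if s.toList.countP friendO = 4 then some "O"
    else rwSpec ss

def dotsSum (l : List String) : Int := (l.map (fun s => (s.toList.countP (· == '.') : Int))).sum

theorem rowLoopA_spec (l : List String) (p : Int) :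
    rowLoopA l p =
      match rwSpec l with
      | some w => .inl (w ++ " won")
      | none => .inr (p + dotsSum l) := by
  induction l generalizing p with
  | nil => simp [rowLoopA, rwSpec, dotsSum]
  | cons r rs ih =>
    have hd : PySem.Chars.count r.toList ['.'] = r.toList.countP (· == '.') := by
      have := count_single '.' r
      simp only [PySem.Str.count_eq] at this
      simpa [List.count] using this
    rcases checkrow_cases r with ⟨hc, h1⟩ | ⟨hc, h1, h2⟩ | ⟨hc, h1, h2⟩ <;>
      simp [rowLoopA, rwSpec, hc, h1, ih, dotsSum, hd, add_assoc] <;> simp [h2]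

-- B's row pass, split into its two components
theorem rowAcc_fold_some (l : List String) (d : Int) (w : String) :
    l.foldl rowAcc (d, some w) = (d + dotsSum l, some w) := by
  induction l generalizing d with
  | nil => simp [dotsSum]
  | cons r rs ih => simp [rowAcc, ih, dotsSum, add_assoc]

theorem rowAcc_fold_none (l : List String) (d : Int) :
    l.foldl rowAcc (d, none) = (d + dotsSum l, rwSpec l) := by
  induction l generalizing d with
  | nil => simp [dotsSum, rwSpec]
  | cons r rs ih =>
    simp only [List.foldl_cons, rowAcc, rwSpec]
    split_ifs with h1 h2 <;>
      simp_all [rowAcc_fold_some, dotsSum, add_assoc]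

theorem iteBump6 (b : Bool) (j : Nat) (g0 g1 g2 g3 g4 g5 : Int) (hj : j < 6) :
    (if b = true then bump [g0,g1,g2,g3,g4,g5] j else [g0,g1,g2,g3,g4,g5]) =
      [if b ∧ j = 0 then g0+1 else g0, if b ∧ j = 1 then g1+1 else g1,
       if b ∧ j = 2 then g2+1 else g2, if b ∧ j = 3 then g3+1 else g3,
       if b ∧ j = 4 then g4+1 else g4, if b ∧ j = 5 then g5+1 else g5] := by
  interval_cases j <;> cases b <;> simp [bump, List.set, List.getD]

theorem iteAdd (b : Bool) (g : Int) :
    (if b = true then g + 1 else g) = g + (if b = true then 1 else 0) := by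
  cases b <;> simp

theorem tRow0 (w x y z : Char) (g0 g1 g2 g3 g4 g5 h0 h1 h2 h3 h4 h5 : Int) :
    cellOp 0 3 z (cellOp 0 2 y (cellOp 0 1 x (cellOp 0 0 w
        ([g0,g1,g2,g3,g4,g5],[h0,h1,h2,h3,h4,h5]))))
      = ([g0+gX w, g1+gX x, g2+gX y, g3+gX z, g4+gX w, g5+gX z],
         [h0+gO w, h1+gO x, h2+gO y, h3+gO z, h4+gO w, h5+gO z]) := by
  norm_num [cellOp, List.foldl, iteBump6, gX, gO, iteAdd]

theorem tRow1 (w x y z : Char) (g0 g1 g2 g3 g4 g5 h0 h1 h2 h3 h4 h5 : Int) :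
    cellOp 1 3 z (cellOp 1 2 y (cellOp 1 1 x (cellOp 1 0 w
        ([g0,g1,g2,g3,g4,g5],[h0,h1,h2,h3,h4,h5]))))
      = ([g0+gX w, g1+gX x, g2+gX y, g3+gX z, g4+gX x, g5+gX y],
         [h0+gO w, h1+gO x, h2+gO y, h3+gO z, h4+gO x, h5+gO y]) := by
  norm_num [cellOp, List.foldl, iteBump6, gX, gO, iteAdd]

theorem tRow2 (w x y z : Char) (g0 g1 g2 g3 g4 g5 h0 h1 h2 h3 h4 h5 : Int) :
    cellOp 2 3 z (cellOp 2 2 y (cellOp 2 1 x (cellOp 2 0 w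
        ([g0,g1,g2,g3,g4,g5],[h0,h1,h2,h3,h4,h5]))))
      = ([g0+gX w, g1+gX x, g2+gX y, g3+gX z, g4+gX y, g5+gX x],
         [h0+gO w, h1+gO x, h2+gO y, h3+gO z, h4+gO y, h5+gO x]) := by
  norm_num [cellOp, List.foldl, iteBump6, gX, gO, iteAdd]

theorem tRow3 (w x y z : Char) (g0 g1 g2 g3 g4 g5 h0 h1 h2 h3 h4 h5 : Int) :
    cellOp 3 3 z (cellOp 3 2 y (cellOp 3 1 x (cellOp 3 0 w
        ([g0,g1,g2,g3,g4,g5],[h0,h1,h2,h3,h4,h5]))))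
      = ([g0+gX w, g1+gX x, g2+gX y, g3+gX z, g4+gX z, g5+gX w],
         [h0+gO w, h1+gO x, h2+gO y, h3+gO z, h4+gO z, h5+gO w]) := by
  norm_num [cellOp, List.foldl, iteBump6, gX, gO, iteAdd]

-- the column string of A, linearized into a condition chain
theorem colLoopA_match (l : List String) (is : List Int) (els : String) :
    (match colLoopA l is with | some r => r | none => els) =
      is.foldr (fun i acc =>
        if [cellA l 0 i, cellA l 1 i, cellA l 2 i, cellA l 3 i].countP friendX = 4 then "X won"
        else if [cellA l 0 i, cellA l 1 i, cellA l 2 i, cellA l 3 i].countP friendO = 4 then "O won"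
        else acc) els := by
  induction is with
  | nil => rfl
  | cons i is ih =>
    simp only [colLoopA, List.foldr_cons]
    rcases checkrow_cases (String.ofList [cellA l 0 i, cellA l 1 i, cellA l 2 i, cellA l 3 i]) with
      ⟨hc, h1⟩ | ⟨hc, h1, h2⟩ | ⟨hc, h1, h2⟩ <;> simp_all

theorem sum4 (w x y z : Char) :
    ((List.countP friendX [w,x,y,z] : Nat) : Int) = 0 + gX w + gX x + gX y + gX z ∧
    ((List.countP friendO [w,x,y,z] : Nat) : Int) = 0 + gO w + gO x + gO y + gO z := by
  cases hw : friendX w <;> cases hx : friendX x <;> cases hy : friendX y <;> cases hz : friendX z <;>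
  cases hw' : friendO w <;> cases hx' : friendO x <;> cases hy' : friendO y <;> cases hz' : friendO z <;>
    simp [gX, gO, hw, hx, hy, hz, hw', hx', hy', hz']

theorem castEq4 (n : Nat) : (((n : Nat) : Int) = (4 : Int)) ↔ n = 4 := by omega

theorem four_len {α : Type} (xs : List α) (h : 4 ≤ xs.length) :
    ∃ a b c d t, xs = a :: b :: c :: d :: t := by
  match xs, h with
  | a :: b :: c :: d :: t, _ => exact ⟨a, b, c, d, t, rfl⟩

theorem checkrow_branch (s : String) (els : String) :
    (if checkrow s ≠ "F" then checkrow s ++ " won" else els) =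
      if s.toList.countP friendX = 4 then "X won"
      else if s.toList.countP friendO = 4 then "O won" else els := by
  rcases checkrow_cases s with ⟨hc, h1⟩ | ⟨hc, h1, h2⟩ | ⟨hc, h1, h2⟩ <;> simp_all

theorem rwSpec_none (l : List String) (h : rwSpec l = none) :
    ∀ s ∈ l, s.toList.countP friendX ≠ 4 ∧ s.toList.countP friendO ≠ 4 := by
  induction l with
  | nil => intro s hs; simp at hs
  | cons r rs ih =>
    unfold rwSpec at h
    split_ifs at h with h1 h2
    intro s hs
    rcases List.mem_cons.mp hs with rfl | hs
    · exact ⟨h1, h2⟩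
    · exact ih h s hs

-- the shared 13-way decision chain both tails normalize to
def NF6 (L0 L1 L2 L3 L4 L5 : List Char) (dots : Int) : String :=
  if L0.countP friendX = 4 then "X won" else if L0.countP friendO = 4 then "O won"
  else if L1.countP friendX = 4 then "X won" else if L1.countP friendO = 4 then "O won"
  else if L2.countP friendX = 4 then "X won" else if L2.countP friendO = 4 then "O won"
  else if L3.countP friendX = 4 then "X won" else if L3.countP friendO = 4 then "O won"
  else if L4.countP friendX = 4 then "X won" else if L4.countP friendO = 4 then "O won"
  else if L5.countP friendX = 4 then "X won" else if L5.countP friendO = 4 then "O won"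
  else if dots = 0 then "Draw" else "Game has not completed"

theorem foldl4 {α : Type} (f : α → Nat → α) (st : α) :
    List.foldl f st [0, 1, 2, 3] = f (f (f (f st 0) 1) 2) 3 := rfl

theorem getD6 (x0 x1 x2 x3 x4 x5 : Int) :
    ([x0,x1,x2,x3,x4,x5].getD 0 0 = x0) ∧ ([x0,x1,x2,x3,x4,x5].getD 1 0 = x1) ∧
    ([x0,x1,x2,x3,x4,x5].getD 2 0 = x2) ∧ ([x0,x1,x2,x3,x4,x5].getD 3 0 = x3) ∧
    ([x0,x1,x2,x3,x4,x5].getD 4 0 = x4) ∧ ([x0,x1,x2,x3,x4,x5].getD 5 0 = x5) := by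
  refine ⟨rfl, rfl, rfl, rfl, rfl, rfl⟩

-- ===== VERDICT (by name: the statement is the Claim_ definition above) =====
set_option maxHeartbeats 1000000 in
theorem solve_spec : Claim_equal_solve := by
  intro l _ hpre
  unfold Spec_solve
  cases hr : rwSpec l with
  | some w =>
    have hA : solve l = w ++ " won" := by
      simp only [solve]
      rw [rowLoopA_spec, hr]
    have hB : solve_alt l = w ++ " won" := by
      simp only [solve_alt, rowAcc_fold_none, hr]
    rw [hA, hB]
  | none =>
    have hwf : 4 ≤ l.length ∧ ∀ s ∈ l.take 4, 4 ≤ s.toList.length := by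
      rcases hpre with ⟨s, hs, hwin⟩ | h
      · exfalso
        have hn := rwSpec_none l hr s hs
        have hX : PySem.Chars.count s.toList ['X'] = s.toList.count 'X' := by
          simpa using count_single 'X' s
        have hO : PySem.Chars.count s.toList ['O'] = s.toList.count 'O' := by
          simpa using count_single 'O' s
        have hT : PySem.Chars.count s.toList ['T'] = s.toList.count 'T' := by
          simpa using count_single 'T' s
        rcases hwin with hw | hw
        · exact hn.1 (by rw [← countXT]; simpa [hX, hT] using hw)
        · exact hn.2 (by rw [← countOT]; simpa [hO, hT] using hw)
      · exact h
    obtain ⟨A, B, C, D, rest, rfl⟩ := four_len l hwf.1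
    have hA4 : 4 ≤ A.toList.length := hwf.2 A (by simp)
    have hB4 : 4 ≤ B.toList.length := hwf.2 B (by simp)
    have hC4 : 4 ≤ C.toList.length := hwf.2 C (by simp)
    have hD4 : 4 ≤ D.toList.length := hwf.2 D (by simp)
    obtain ⟨a0, a1, a2, a3, ta, hAtl⟩ := four_len A.toList hA4
    obtain ⟨b0, b1, b2, b3, tb, hBtl⟩ := four_len B.toList hB4
    obtain ⟨c0, c1, c2, c3, tc, hCtl⟩ := four_len C.toList hC4
    obtain ⟨d0, d1, d2, d3, td, hDtl⟩ := four_len D.toList hD4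
    have hq1 : (0 : Int) ≤ (rest.length : Int) + 1 + 1 := by omega
    have hq2 : (0 : Int) ≤ (rest.length : Int) + 1 := by omega
    have hq3 : (0 : Int) ≤ (rest.length : Int) := by omega
    have e00 : cellA (A :: B :: C :: D :: rest) 0 0 = a0 := by
      have hi : ((0 : Int)) ≤ (rest.length : Int) + 1 + 1 + 1 := by omega
      have hj : 0 < A.length := by
        have := congrArg List.length hAtl
        simp at this
        omega
      simp [cellA, PySem.List.pyGet?, PySem.List.pyIdx?, hAtl, hi, hj, hq1, hq2, hq3]
    have e01 : cellA (A :: B :: C :: D :: rest) 0 1 = a1 := by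
      have hi : ((0 : Int)) ≤ (rest.length : Int) + 1 + 1 + 1 := by omega
      have hj : 1 < A.length := by
        have := congrArg List.length hAtl
        simp at this
        omega
      simp [cellA, PySem.List.pyGet?, PySem.List.pyIdx?, hAtl, hi, hj, hq1, hq2, hq3]
    have e02 : cellA (A :: B :: C :: D :: rest) 0 2 = a2 := by
      have hi : ((0 : Int)) ≤ (rest.length : Int) + 1 + 1 + 1 := by omega
      have hj : 2 < A.length := by
        have := congrArg List.length hAtl
        simp at this
        omega
      simp [cellA, PySem.List.pyGet?, PySem.List.pyIdx?, hAtl, hi, hj, hq1, hq2, hq3]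
    have e03 : cellA (A :: B :: C :: D :: rest) 0 3 = a3 := by
      have hi : ((0 : Int)) ≤ (rest.length : Int) + 1 + 1 + 1 := by omega
      have hj : 3 < A.length := by
        have := congrArg List.length hAtl
        simp at this
        omega
      simp [cellA, PySem.List.pyGet?, PySem.List.pyIdx?, hAtl, hi, hj, hq1, hq2, hq3]
    have e10 : cellA (A :: B :: C :: D :: rest) 1 0 = b0 := by
      have hi : ((1 : Int)) ≤ (rest.length : Int) + 1 + 1 + 1 := by omega
      have hj : 0 < B.length := by
        have := congrArg List.length hBtl
        simp at this
        omega
      simp [cellA, PySem.List.pyGet?, PySem.List.pyIdx?, hBtl, hi, hj, hq1, hq2, hq3]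
    have e11 : cellA (A :: B :: C :: D :: rest) 1 1 = b1 := by
      have hi : ((1 : Int)) ≤ (rest.length : Int) + 1 + 1 + 1 := by omega
      have hj : 1 < B.length := by
        have := congrArg List.length hBtl
        simp at this
        omega
      simp [cellA, PySem.List.pyGet?, PySem.List.pyIdx?, hBtl, hi, hj, hq1, hq2, hq3]
    have e12 : cellA (A :: B :: C :: D :: rest) 1 2 = b2 := by
      have hi : ((1 : Int)) ≤ (rest.length : Int) + 1 + 1 + 1 := by omega
      have hj : 2 < B.length := by
        have := congrArg List.length hBtl
        simp at this
        omega
      simp [cellA, PySem.List.pyGet?, PySem.List.pyIdx?, hBtl, hi, hj, hq1, hq2, hq3]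
    have e13 : cellA (A :: B :: C :: D :: rest) 1 3 = b3 := by
      have hi : ((1 : Int)) ≤ (rest.length : Int) + 1 + 1 + 1 := by omega
      have hj : 3 < B.length := by
        have := congrArg List.length hBtl
        simp at this
        omega
      simp [cellA, PySem.List.pyGet?, PySem.List.pyIdx?, hBtl, hi, hj, hq1, hq2, hq3]
    have e20 : cellA (A :: B :: C :: D :: rest) 2 0 = c0 := by
      have hi : ((2 : Int)) ≤ (rest.length : Int) + 1 + 1 + 1 := by omega
      have hj : 0 < C.length := by
        have := congrArg List.length hCtl
        simp at this
        omega
      simp [cellA, PySem.List.pyGet?, PySem.List.pyIdx?, hCtl, hi, hj, hq1, hq2, hq3]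
    have e21 : cellA (A :: B :: C :: D :: rest) 2 1 = c1 := by
      have hi : ((2 : Int)) ≤ (rest.length : Int) + 1 + 1 + 1 := by omega
      have hj : 1 < C.length := by
        have := congrArg List.length hCtl
        simp at this
        omega
      simp [cellA, PySem.List.pyGet?, PySem.List.pyIdx?, hCtl, hi, hj, hq1, hq2, hq3]
    have e22 : cellA (A :: B :: C :: D :: rest) 2 2 = c2 := by
      have hi : ((2 : Int)) ≤ (rest.length : Int) + 1 + 1 + 1 := by omega
      have hj : 2 < C.length := by
        have := congrArg List.length hCtl
        simp at this
        omega
      simp [cellA, PySem.List.pyGet?, PySem.List.pyIdx?, hCtl, hi, hj, hq1, hq2, hq3]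
    have e23 : cellA (A :: B :: C :: D :: rest) 2 3 = c3 := by
      have hi : ((2 : Int)) ≤ (rest.length : Int) + 1 + 1 + 1 := by omega
      have hj : 3 < C.length := by
        have := congrArg List.length hCtl
        simp at this
        omega
      simp [cellA, PySem.List.pyGet?, PySem.List.pyIdx?, hCtl, hi, hj, hq1, hq2, hq3]
    have e30 : cellA (A :: B :: C :: D :: rest) 3 0 = d0 := by
      have hi : ((3 : Int)) ≤ (rest.length : Int) + 1 + 1 + 1 := by omega
      have hj : 0 < D.length := by
        have := congrArg List.length hDtl
        simp at this
        omega
      simp [cellA, PySem.List.pyGet?, PySem.List.pyIdx?, hDtl, hi, hj, hq1, hq2, hq3]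
    have e31 : cellA (A :: B :: C :: D :: rest) 3 1 = d1 := by
      have hi : ((3 : Int)) ≤ (rest.length : Int) + 1 + 1 + 1 := by omega
      have hj : 1 < D.length := by
        have := congrArg List.length hDtl
        simp at this
        omega
      simp [cellA, PySem.List.pyGet?, PySem.List.pyIdx?, hDtl, hi, hj, hq1, hq2, hq3]
    have e32 : cellA (A :: B :: C :: D :: rest) 3 2 = d2 := by
      have hi : ((3 : Int)) ≤ (rest.length : Int) + 1 + 1 + 1 := by omega
      have hj : 2 < D.length := by
        have := congrArg List.length hDtl
        simp at this
        omega
      simp [cellA, PySem.List.pyGet?, PySem.List.pyIdx?, hDtl, hi, hj, hq1, hq2, hq3]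
    have e33 : cellA (A :: B :: C :: D :: rest) 3 3 = d3 := by
      have hi : ((3 : Int)) ≤ (rest.length : Int) + 1 + 1 + 1 := by omega
      have hj : 3 < D.length := by
        have := congrArg List.length hDtl
        simp at this
        omega
      simp [cellA, PySem.List.pyGet?, PySem.List.pyIdx?, hDtl, hi, hj, hq1, hq2, hq3]

    have f00 : cellB (A :: B :: C :: D :: rest) 0 0 = a0 := e00
    have f01 : cellB (A :: B :: C :: D :: rest) 0 1 = a1 := e01
    have f02 : cellB (A :: B :: C :: D :: rest) 0 2 = a2 := e02
    have f03 : cellB (A :: B :: C :: D :: rest) 0 3 = a3 := e03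
    have f10 : cellB (A :: B :: C :: D :: rest) 1 0 = b0 := e10
    have f11 : cellB (A :: B :: C :: D :: rest) 1 1 = b1 := e11
    have f12 : cellB (A :: B :: C :: D :: rest) 1 2 = b2 := e12
    have f13 : cellB (A :: B :: C :: D :: rest) 1 3 = b3 := e13
    have f20 : cellB (A :: B :: C :: D :: rest) 2 0 = c0 := e20
    have f21 : cellB (A :: B :: C :: D :: rest) 2 1 = c1 := e21
    have f22 : cellB (A :: B :: C :: D :: rest) 2 2 = c2 := e22
    have f23 : cellB (A :: B :: C :: D :: rest) 2 3 = c3 := e23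
    have f30 : cellB (A :: B :: C :: D :: rest) 3 0 = d0 := e30
    have f31 : cellB (A :: B :: C :: D :: rest) 3 1 = d1 := e31
    have f32 : cellB (A :: B :: C :: D :: rest) 3 2 = d2 := e32
    have f33 : cellB (A :: B :: C :: D :: rest) 3 3 = d3 := e33
    have hAside : solve (A :: B :: C :: D :: rest) =
        NF6 [a0,b0,c0,d0] [a1,b1,c1,d1] [a2,b2,c2,d2] [a3,b3,c3,d3] [a0,b1,c2,d3] [a3,b2,c1,d0]
          (0 + dotsSum (A :: B :: C :: D :: rest)) := by
      simp only [solve]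
      rw [rowLoopA_spec, hr]
      dsimp only
      rw [show PySem.List.pyRange 0 4 1 = ([0,1,2,3] : List Int) from by decide]
      rw [colLoopA_match]
      rw [show ∀ (f : Int → String → String) (e : String),
            List.foldr f e ([0,1,2,3] : List Int) = f 0 (f 1 (f 2 (f 3 e))) from fun f e => rfl]
      rw [e00, e10, e20, e30, e01, e11, e21, e31, e02, e12, e22, e32, e03, e13, e23, e33]
      rw [checkrow_branch, checkrow_branch]
      simp only [String.toList_ofList, NF6]
    have hBside : solve_alt (A :: B :: C :: D :: rest) =
        NF6 [a0,b0,c0,d0] [a1,b1,c1,d1] [a2,b2,c2,d2] [a3,b3,c3,d3] [a0,b1,c2,d3] [a3,b2,c1,d0]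
          (0 + dotsSum (A :: B :: C :: D :: rest)) := by
      simp only [solve_alt, rowAcc_fold_none, hr]
      rw [show List.range 4 = [0,1,2,3] from by decide]
      simp only [foldl4]
      rw [f00, f01, f02, f03, f10, f11, f12, f13, f20, f21, f22, f23, f30, f31, f32, f33]
      rw [tRow0, tRow1, tRow2, tRow3]
      rw [show List.range 6 = [0,1,2,3,4,5] from by decide]
      simp only [finalScan, getD6]
      rw [← (sum4 a0 b0 c0 d0).1, ← (sum4 a0 b0 c0 d0).2,
          ← (sum4 a1 b1 c1 d1).1, ← (sum4 a1 b1 c1 d1).2,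
          ← (sum4 a2 b2 c2 d2).1, ← (sum4 a2 b2 c2 d2).2,
          ← (sum4 a3 b3 c3 d3).1, ← (sum4 a3 b3 c3 d3).2,
          ← (sum4 a0 b1 c2 d3).1, ← (sum4 a0 b1 c2 d3).2,
          ← (sum4 a3 b2 c1 d0).1, ← (sum4 a3 b2 c1 d0).2]
      simp only [castEq4, NF6]
    rw [hAside, hBside]
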